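-- pv_equiv track=rewrite | github.com/xinyuewangg/DGCMM | augment_ftl.py | split_class
-- ===== SOURCE A (Python) =====
-- def split_class(class_cnts, many_shot_thr=100):
--     many_cls = []
--     few_cls = []
--     for i, cnt in enumerate(class_cnts):
--         if cnt > many_shot_thr:
--             many_cls.append((cnt, i))
--         else:
--             few_cls.append((cnt, i))
--     return [x for _, x in sorted(many_cls, reverse=True, key=lambda x: x[0])], \
--            [x for _, x in sorted(few_cls, reverse=True, key=lambda x: x[0])]
-- ===== SOURCE B (Python) =====
-- def split_class(class_cnts, many_shot_thr=100):
--     # sort once (count descending, stable), then partition in a single pass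
--     many_cls = []
--     few_cls = []
--     for i, cnt in sorted(enumerate(class_cnts), key=lambda p: p[1], reverse=True):
--         (many_cls if cnt > many_shot_thr else few_cls).append(i)
--     return many_cls, few_cls
-- ===== Notes on version B (the rewrite author's own statement) =====
-- stated objective: alternative
-- what changed: B sorts the enumerated list once (stable, descending by count) and partitions the sorted indices in a single pass, instead of A's partition-into-pair-lists followed by two separate sorts and projections.
import Mathlib
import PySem

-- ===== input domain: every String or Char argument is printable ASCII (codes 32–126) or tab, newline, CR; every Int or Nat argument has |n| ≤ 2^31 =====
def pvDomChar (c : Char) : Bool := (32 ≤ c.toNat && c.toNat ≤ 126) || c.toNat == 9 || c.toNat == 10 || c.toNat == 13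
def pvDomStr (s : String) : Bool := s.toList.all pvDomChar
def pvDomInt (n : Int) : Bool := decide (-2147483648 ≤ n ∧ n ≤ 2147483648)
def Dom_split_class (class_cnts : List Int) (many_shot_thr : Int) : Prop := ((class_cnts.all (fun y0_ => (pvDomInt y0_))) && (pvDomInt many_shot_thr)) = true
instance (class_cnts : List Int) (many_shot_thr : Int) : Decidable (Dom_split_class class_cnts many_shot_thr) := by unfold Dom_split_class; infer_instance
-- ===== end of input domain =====

-- B sorts the enumerated list once (stable, count-descending) and partitions in one pass,
-- instead of A's partition into (cnt, i) pair lists followed by two separate sorts.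

-- ===== PORT A =====
def split_class (class_cnts : List Int) (many_shot_thr : Int) : List Int × List Int :=
  let res := (PySem.List.enumerate class_cnts).foldl
    (fun (mf : List (Int × Int) × List (Int × Int)) ic =>
      if ic.2 > many_shot_thr then (mf.1 ++ [(ic.2, ic.1)], mf.2)
      else (mf.1, mf.2 ++ [(ic.2, ic.1)])) ([], [])
  ((PySem.List.sorted res.1 (fun x => x.1) true).map (fun x => x.2),
   (PySem.List.sorted res.2 (fun x => x.1) true).map (fun x => x.2))

-- ===== PORT B =====
def split_class_alt (class_cnts : List Int) (many_shot_thr : Int) : List Int × List Int :=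
  let order := PySem.List.sorted (PySem.List.enumerate class_cnts) (fun p => p.2) true
  order.foldl
    (fun (mf : List Int × List Int) p =>
      if p.2 > many_shot_thr then (mf.1 ++ [p.1], mf.2)
      else (mf.1, mf.2 ++ [p.1])) ([], [])

-- ===== PRECONDITION & SPEC =====
def Spec_split_class (class_cnts : List Int) (many_shot_thr : Int) (out : List Int × List Int) : Prop := out = split_class_alt class_cnts many_shot_thr
instance (class_cnts : List Int) (many_shot_thr : Int) (out : List Int × List Int) : Decidable (Spec_split_class class_cnts many_shot_thr out) := by unfold Spec_split_class; infer_instance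

-- ===== CLAIM (what is proved, stated in full; the proofs are below) =====
def Claim_equal_split_class : Prop := ∀ (class_cnts : List Int) (many_shot_thr : Int), Dom_split_class class_cnts many_shot_thr → Spec_split_class class_cnts many_shot_thr (split_class class_cnts many_shot_thr)

-- ===== LEMMAS AND PROOFS =====

-- insertBy puts x in front when x should go before every element of l
theorem ins_all_before {α : Type} (key : α → Int) (x : α) (l : List α)
    (h : ∀ z ∈ l, key z < key x) :
    PySem.List.insertBy (fun a b => decide (key b < key a)) x l = x :: l := by
  cases l with
  | nil => rfl
  | cons z zs => simp [PySem.List.insertBy, h z (by simp)]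

-- insertBy preserves descending order
theorem ins_pairwise {α : Type} (key : α → Int) (x : α) (l : List α)
    (h : l.Pairwise (fun a b => key b ≤ key a)) :
    (PySem.List.insertBy (fun a b => decide (key b < key a)) x l).Pairwise
      (fun a b => key b ≤ key a) := by
  induction l with
  | nil => simp [PySem.List.insertBy]
  | cons y ys ih =>
    rcases List.pairwise_cons.mp h with ⟨hy, hys⟩
    by_cases hb : key y < key x
    · simp only [PySem.List.insertBy, hb, decide_true, if_pos]
      refine List.pairwise_cons.mpr ⟨?_, h⟩
      intro z hz
      rcases List.mem_cons.mp hz with hz | hz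
      · subst hz; omega
      · have := hy z hz; omega
    · simp only [PySem.List.insertBy, hb, decide_false, if_neg, Bool.false_eq_true,
        not_false_iff]
      refine List.pairwise_cons.mpr ⟨?_, ih hys⟩
      intro z hz
      rcases (PySem.List.mem_insertBy _ _ _ _).mp hz with hz | hz
      · subst hz; omega
      · exact hy z hz

-- filtering commutes with insertBy into a descending list
theorem ins_filter {α : Type} (key : α → Int) (p : α → Bool) (x : α) (l : List α)
    (h : l.Pairwise (fun a b => key b ≤ key a)) :
    (PySem.List.insertBy (fun a b => decide (key b < key a)) x l).filter p =
      if p x then PySem.List.insertBy (fun a b => decide (key b < key a)) x (l.filter p)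
      else l.filter p := by
  induction l with
  | nil => cases hx : p x <;> simp [PySem.List.insertBy, hx]
  | cons y ys ih =>
    rcases List.pairwise_cons.mp h with ⟨hy, hys⟩
    by_cases hb : key y < key x
    · -- x goes in front; every element of y :: ys is strictly key-below x
      have hall : ∀ z ∈ (y :: ys).filter p, key z < key x := by
        intro z hz
        rcases List.mem_filter.mp hz with ⟨hz, _⟩
        rcases List.mem_cons.mp hz with hz | hz
        · subst hz; exact hb
        · have := hy z hz; omega
      rw [ins_all_before key x (y :: ys) (by
        intro z hz
        rcases List.mem_cons.mp hz with hz | hz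
        · subst hz; exact hb
        · have := hy z hz; omega)]
      cases hx : p x
      · simp [List.filter_cons, hx]
      · simp only [if_pos]
        rw [ins_all_before key x _ hall]
        simp [List.filter_cons, hx]
    · simp only [PySem.List.insertBy, hb, decide_false, Bool.false_eq_true, if_neg,
        not_false_iff]
      cases hx : p x <;> cases hyp : p y <;>
        simp_all [PySem.List.insertBy]
-- sorted (reverse=True) commutes with filter
theorem foldl_ins_filter {α : Type} (key : α → Int) (p : α → Bool) :
    ∀ (xs l : List α), l.Pairwise (fun a b => key b ≤ key a) →
    ((xs.foldl (fun acc y => PySem.List.insertBy (fun a b => decide (key b < key a)) y acc) l).filter p) =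
      (xs.filter p).foldl (fun acc y => PySem.List.insertBy (fun a b => decide (key b < key a)) y acc) (l.filter p) := by
  intro xs
  induction xs with
  | nil => intro l _; rfl
  | cons x xs ih =>
    intro l hl
    have h1 := ih (PySem.List.insertBy (fun a b => decide (key b < key a)) x l)
      (ins_pairwise key x l hl)
    cases hx : p x
    · simp only [List.foldl_cons, List.filter_cons, hx, Bool.false_eq_true, if_neg,
        not_false_iff]
      rw [h1, ins_filter key p x l hl, hx]
      simp
    · simp only [List.foldl_cons, List.filter_cons, hx, if_pos]
      rw [h1, ins_filter key p x l hl, hx]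
      simp

theorem sorted_rev_filter {α : Type} (key : α → Int) (p : α → Bool) (xs : List α) :
    (PySem.List.sorted xs key true).filter p = PySem.List.sorted (xs.filter p) key true := by
  rw [PySem.List.sorted_rev_eq_foldl_insertBy, PySem.List.sorted_rev_eq_foldl_insertBy]
  exact foldl_ins_filter key p xs [] List.Pairwise.nil

-- insertBy on swapped pairs
theorem ins_map_swap (x : Int × Int) (l : List (Int × Int)) :
    PySem.List.insertBy (fun a b => decide ((b : Int × Int).1 < a.1)) (x.2, x.1)
        (l.map (fun q => (q.2, q.1))) =
      (PySem.List.insertBy (fun a b => decide ((b : Int × Int).2 < a.2)) x l).map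
        (fun q => (q.2, q.1)) := by
  induction l with
  | nil => rfl
  | cons y ys ih =>
    by_cases hb : y.2 < x.2
    · simp [PySem.List.insertBy, hb]
    · simp [PySem.List.insertBy, hb, ih]

-- sorting swapped pairs by fst = swapping the snd-sorted pairs
theorem sorted_map_swap (xs : List (Int × Int)) :
    PySem.List.sorted (xs.map (fun q => (q.2, q.1))) (fun x => x.1) true =
      (PySem.List.sorted xs (fun x => x.2) true).map (fun q => (q.2, q.1)) := by
  rw [PySem.List.sorted_rev_eq_foldl_insertBy, PySem.List.sorted_rev_eq_foldl_insertBy]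
  suffices h : ∀ (xs l : List (Int × Int)),
      (xs.map (fun q => (q.2, q.1))).foldl
        (fun acc y => PySem.List.insertBy (fun a b => decide ((b : Int × Int).1 < a.1)) y acc)
        (l.map (fun q => (q.2, q.1))) =
      (xs.foldl (fun acc y => PySem.List.insertBy (fun a b => decide ((b : Int × Int).2 < a.2)) y acc) l).map
        (fun q => (q.2, q.1)) by
    simpa using h xs []
  intro xs
  induction xs with
  | nil => intro l; rfl
  | cons x rest ih =>
    intro l
    simp only [List.map_cons, List.foldl_cons]
    rw [ins_map_swap x l]
    exact ih _

-- the append-into-a-pair loop is a double filter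
theorem partition_foldl {α β : Type} (p : α → Prop) [DecidablePred p] (g : α → β) :
    ∀ (xs : List α) (m0 f0 : List β),
    xs.foldl (fun (mf : List β × List β) x =>
        if p x then (mf.1 ++ [g x], mf.2) else (mf.1, mf.2 ++ [g x])) (m0, f0) =
      (m0 ++ (xs.filter (fun x => decide (p x))).map g,
       f0 ++ (xs.filter (fun x => !decide (p x))).map g) := by
  intro xs
  induction xs with
  | nil => intro m0 f0; simp
  | cons x rest ih =>
    intro m0 f0
    by_cases hx : p x <;> simp [hx, ih]

-- ===== VERDICT (by name: the statement is the Claim_ definition above) =====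
theorem split_class_spec : Claim_equal_split_class := by
  intro class_cnts many_shot_thr _
  unfold Spec_split_class split_class split_class_alt
  rw [partition_foldl (fun ic : Int × Int => ic.2 > many_shot_thr) (fun ic => (ic.2, ic.1))]
  rw [partition_foldl (fun ic : Int × Int => ic.2 > many_shot_thr) (fun ic => ic.1)]
  simp only [List.nil_append]
  rw [sorted_map_swap, sorted_map_swap]
  rw [← sorted_rev_filter (fun x : Int × Int => x.2)
        (fun x => decide (x.2 > many_shot_thr)) (PySem.List.enumerate class_cnts)]
  rw [← sorted_rev_filter (fun x : Int × Int => x.2)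
        (fun x => !decide (x.2 > many_shot_thr)) (PySem.List.enumerate class_cnts)]
  simp [Function.comp]
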